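-- pv_equiv track=rewrite | github.com/julescotard/FitnessPlatinium-joga-kalestenika- | scrape_fp.py | _fold_ical_line
-- ===== SOURCE A (Python) =====
-- from typing import Any, Dict, Iterable, List, Optional, Set, Tuple
--
-- def _fold_ical_line(line: str, limit: int = 75) -> List[str]:
--     b = line.encode("utf-8")
--     if len(b) <= limit:
--         return [line]
--     out: List[str] = []
--     cur_bytes = bytearray()
--     cur_chars: List[str] = []
--
--     def flush(prefix_space: bool = False):
--         if cur_chars:
--             out.append((" " if prefix_space else "") + "".join(cur_chars))
--
--     first = True
--     for ch in line:
--         chb = ch.encode("utf-8")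
--         if len(cur_bytes) + len(chb) > limit:
--             flush(prefix_space=not first)
--             first = False
--             cur_bytes = bytearray()
--             cur_chars = []
--         cur_bytes.extend(chb)
--         cur_chars.append(ch)
--     flush(prefix_space=not first)
--     return out
-- ===== SOURCE B (Python) =====
-- from typing import List
--
--
-- def _take_count(s: str, limit: int) -> int:
--     """Number of leading characters of s whose UTF-8 bytes fit in limit (at least 1)."""
--     acc = 0
--     n = 0
--     for ch in s:
--         w = len(ch.encode("utf-8"))
--         if acc + w > limit:
--             break
--         acc += w
--         n += 1
--     return n or 1
--
--
-- def _fold_ical_line(line: str, limit: int = 75) -> List[str]: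
--     if len(line.encode("utf-8")) <= limit:
--         return [line]
--     pieces: List[str] = []
--     rest = line
--     while rest:
--         n = _take_count(rest, limit)
--         pieces.append(rest[:n])
--         rest = rest[n:]
--     return [p if j == 0 else " " + p for j, p in enumerate(pieces)]
-- ===== Notes on version B (the rewrite author's own statement) =====
-- stated objective: alternative
-- what changed: Replaces A's char-at-a-time loop with mutable byte/char buffers, a flush closure and a first flag by a chunk-at-a-time decomposition: a helper takes the longest fitting (at least one char) prefix, a while loop slices the line into pieces, and one comprehension adds the continuation space to every piece except the first.
-- intended difference: On nonempty lines with limit < 1, where not even one character fits, A prefixes the continuation space to the first chunk as well; B leaves the first chunk unprefixed, the intended folding rule that only continuation lines start with a space. — e.g. on _fold_ical_line("ab", 0): A returns [" a", " b"], B returns ["a", " b"]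
import Mathlib
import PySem

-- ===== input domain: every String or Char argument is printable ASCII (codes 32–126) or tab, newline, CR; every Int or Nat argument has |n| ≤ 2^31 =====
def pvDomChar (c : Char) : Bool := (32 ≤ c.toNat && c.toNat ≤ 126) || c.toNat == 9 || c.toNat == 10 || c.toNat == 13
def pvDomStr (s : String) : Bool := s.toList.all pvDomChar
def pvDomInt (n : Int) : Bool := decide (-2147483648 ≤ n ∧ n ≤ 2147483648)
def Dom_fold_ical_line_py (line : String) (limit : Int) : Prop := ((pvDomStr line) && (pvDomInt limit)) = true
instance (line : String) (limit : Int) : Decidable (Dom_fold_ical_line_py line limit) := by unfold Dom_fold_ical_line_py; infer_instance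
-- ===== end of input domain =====

-- B folds the line chunk-at-a-time (take the longest fitting prefix, slice it off) instead of
-- A's char-at-a-time loop with mutable buffers and a flush closure; same output except on the
-- degenerate inputs described at D_ below.

-- ===== PORT A =====
-- length in bytes of one character's UTF-8 encoding (= len(ch.encode("utf-8")))
def pvUtf8Len (c : Char) : Int :=
  if c.toNat < 128 then 1 else if c.toNat < 2048 then 2
  else if c.toNat < 65536 then 3 else 4

-- len(s.encode("utf-8"))
def pvEncLen (cs : List Char) : Int := (cs.map pvUtf8Len).sum

-- the nested 'flush' closure (strings modelled as their char lists, joined by String.ofList)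
def pvFlush (out : List String) (curChars : List Char) (prefixSpace : Bool) : List String :=
  if curChars = [] then out
  else out ++ [String.ofList ((if prefixSpace then [' '] else []) ++ curChars)]

-- the 'for ch in line' loop; curB is len(cur_bytes) (the bytearray is only ever measured)
def pvFoldLoop (limit : Int) : List Char → List String → Int → List Char → Bool →
    List String × Int × List Char × Bool
  | [], out, curB, curC, first => (out, curB, curC, first)
  | ch :: rest, out, curB, curC, first =>
    let chb := pvUtf8Len ch
    if curB + chb > limit then
      pvFoldLoop limit rest (pvFlush out curC (!first)) chb [ch] false
    else
      pvFoldLoop limit rest out (curB + chb) (curC ++ [ch]) first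

def fold_ical_line_py (line : String) (limit : Int) : List String :=
  if pvEncLen line.toList ≤ limit then [line]
  else
    match pvFoldLoop limit line.toList [] 0 [] true with
    | (out, _, curC, first) => pvFlush out curC (!first)

-- ===== PORT B =====
def pvUtf8LenB (c : Char) : Int :=
  if c.toNat < 128 then 1 else if c.toNat < 2048 then 2
  else if c.toNat < 65536 then 3 else 4

def pvEncLenB (cs : List Char) : Int := (cs.map pvUtf8LenB).sum

-- the 'for ch in s' loop of _take_count (n is a nonnegative count, kept as Nat)
def pvTakeCountLoop (limit : Int) : List Char → Int → Nat → Nat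
  | [], _, n => n
  | ch :: rest, acc, n =>
    let w := pvUtf8LenB ch
    if acc + w > limit then n else pvTakeCountLoop limit rest (acc + w) (n + 1)

-- _take_count: 'return n or 1'
def pvTakeCount (s : List Char) (limit : Int) : Nat :=
  let n := pvTakeCountLoop limit s 0 0
  if n = 0 then 1 else n

-- (used by pvPieces's termination argument)
theorem pvTakeCount_pos (s : List Char) (limit : Int) : 1 ≤ pvTakeCount s limit := by
  show 1 ≤ if pvTakeCountLoop limit s 0 0 = 0 then 1 else pvTakeCountLoop limit s 0 0
  split <;> omega

-- the 'while rest:' loop slicing off one chunk at a time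
def pvPieces (limit : Int) : List Char → List (List Char)
  | [] => []
  | c :: cs =>
    let n := pvTakeCount (c :: cs) limit
    (c :: cs).take n :: pvPieces limit ((c :: cs).drop n)
  termination_by s => s.length
  decreasing_by
    have h := pvTakeCount_pos (c :: cs) limit
    simp only [List.length_drop, List.length_cons]
    omega

def fold_ical_line_py_alt (line : String) (limit : Int) : List String :=
  if pvEncLenB line.toList ≤ limit then [line]
  else
    let pieces := pvPieces limit line.toList
    (PySem.List.enumerate pieces 0).map
      (fun jp => if jp.1 == 0 then String.ofList jp.2 else String.ofList (' ' :: jp.2))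

-- ===== PRECONDITION & SPEC =====
-- On nonempty lines with limit < 1, where not even one character fits, A prefixes the continuation
-- space to the first chunk as well; B leaves the first chunk unprefixed, the intended folding rule
-- that only continuation lines start with a space.
def D_fold_ical_line_py (line : String) (limit : Int) : Prop := line ≠ "" ∧ limit < 1
instance (line : String) (limit : Int) : Decidable (D_fold_ical_line_py line limit) := by unfold D_fold_ical_line_py; infer_instance

def Spec_fold_ical_line_py (line : String) (limit : Int) (out : List String) : Prop := ¬ D_fold_ical_line_py line limit → out = fold_ical_line_py_alt line limit
instance (line : String) (limit : Int) (out : List String) : Decidable (Spec_fold_ical_line_py line limit out) := by unfold Spec_fold_ical_line_py; infer_instance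

def pvDiffWitness_fold_ical_line_py : String × Int := ("ab", 0)
def pvDiffWitnessOut_fold_ical_line_py : (List String) × (List String) := ([" a", " b"], ["a", " b"])

-- ===== CLAIM (what is proved, stated in full; the proofs are below) =====
def Claim_unchanged_fold_ical_line_py : Prop := ∀ (line : String) (limit : Int), Dom_fold_ical_line_py line limit → Spec_fold_ical_line_py line limit (fold_ical_line_py line limit)
def Claim_changed_fold_ical_line_py : Prop := Dom_fold_ical_line_py (pvDiffWitness_fold_ical_line_py.1) (pvDiffWitness_fold_ical_line_py.2) ∧ D_fold_ical_line_py (pvDiffWitness_fold_ical_line_py.1) (pvDiffWitness_fold_ical_line_py.2) ∧ fold_ical_line_py (pvDiffWitness_fold_ical_line_py.1) (pvDiffWitness_fold_ical_line_py.2) = pvDiffWitnessOut_fold_ical_line_py.1 ∧ fold_ical_line_py_alt (pvDiffWitness_fold_ical_line_py.1) (pvDiffWitness_fold_ical_line_py.2) = pvDiffWitnessOut_fold_ical_line_py.2 ∧ pvDiffWitnessOut_fold_ical_line_py.1 ≠ pvDiffWitnessOut_fold_ical_line_py.2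
def Claim_exact_fold_ical_line_py : Prop := ∀ (line : String) (limit : Int), Dom_fold_ical_line_py line limit → D_fold_ical_line_py line limit → fold_ical_line_py line limit ≠ fold_ical_line_py_alt line limit

-- ===== LEMMAS AND PROOFS =====

-- the loop's epilogue: the final flush applied to the loop's end state
def pvFinish (r : List String × Int × List Char × Bool) : List String :=
  pvFlush r.1 r.2.2.1 (!r.2.2.2)

theorem pvUtf8Len_eq : pvUtf8Len = pvUtf8LenB := rfl

theorem pvUtf8LenB_pos (c : Char) : 0 < pvUtf8LenB c := by
  unfold pvUtf8LenB; split_ifs <;> omega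

theorem pvTakeCountLoop_shift (limit : Int) (s : List Char) :
    ∀ (acc : Int) (n : Nat), pvTakeCountLoop limit s acc n = n + pvTakeCountLoop limit s acc 0 := by
  induction s with
  | nil => intro acc n; simp [pvTakeCountLoop]
  | cons c cs ih =>
    intro acc n
    simp only [pvTakeCountLoop]
    split
    · simp
    · rw [ih _ (n + 1), ih _ (0 + 1)]; omega

theorem pvTakeCountLoop_zero_of_lt (limit : Int) (s : List Char) (acc : Int)
    (h : limit < acc) : pvTakeCountLoop limit s acc 0 = 0 := by
  cases s with
  | nil => rfl
  | cons c cs =>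
    have := pvUtf8LenB_pos c
    simp only [pvTakeCountLoop]
    rw [if_pos (by omega)]

-- one unfolding of B's while loop, with the count expressed via the loop on the tail
theorem pvPieces_cons (limit : Int) (c : Char) (cs : List Char) :
    pvPieces limit (c :: cs)
      = (c :: cs.take (pvTakeCountLoop limit cs (pvUtf8LenB c) 0))
        :: pvPieces limit (cs.drop (pvTakeCountLoop limit cs (pvUtf8LenB c) 0)) := by
  rw [pvPieces]
  have hcount : pvTakeCount (c :: cs) limit
      = 1 + pvTakeCountLoop limit cs (pvUtf8LenB c) 0 := by
    show (if pvTakeCountLoop limit (c :: cs) 0 0 = 0 then 1 else pvTakeCountLoop limit (c :: cs) 0 0) = _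
    simp only [pvTakeCountLoop, zero_add]
    by_cases h : pvUtf8LenB c > limit
    · rw [if_pos h, pvTakeCountLoop_zero_of_lt limit cs (pvUtf8LenB c) h]
      simp
    · rw [if_neg h, pvTakeCountLoop_shift]
      simp [Nat.add_comm]
  rw [hcount]
  simp [List.take_succ_cons, List.drop_succ_cons, Nat.add_comm 1]

theorem pvEncLen_append_singleton (cs : List Char) (c : Char) :
    pvEncLen (cs ++ [c]) = pvEncLen cs + pvUtf8Len c := by
  simp [pvEncLen]

-- A's loop-then-final-flush, started mid-group on a nonempty current chunk, produces that chunk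
-- extended greedily, followed by B's chunks of what remains; every chunk after an earlier flush
-- (first = false) carries the leading space
theorem pvFoldLoop_chunks (limit : Int) :
    ∀ (rest curC : List Char) (out : List String) (first : Bool), curC ≠ [] →
      pvFinish (pvFoldLoop limit rest out (pvEncLen curC) curC first)
      = out ++ (String.ofList ((if first then [] else [' '])
                  ++ (curC ++ rest.take (pvTakeCountLoop limit rest (pvEncLen curC) 0))))
          :: (pvPieces limit (rest.drop (pvTakeCountLoop limit rest (pvEncLen curC) 0))).map
               (fun p => String.ofList (' ' :: p)) := by
  intro rest
  induction rest with
  | nil =>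
    intro curC out first h
    simp [pvFoldLoop, pvFinish, pvTakeCountLoop, pvPieces, pvFlush, h]
    cases first <;> simp
  | cons ch r ih =>
    intro curC out first h
    simp only [pvFoldLoop]
    by_cases hb : pvEncLen curC + pvUtf8Len ch > limit
    · rw [if_pos hb]
      have hL : pvEncLen [ch] = pvUtf8Len ch := by simp [pvEncLen]
      have hstep := ih [ch] (pvFlush out curC (!first)) false (by simp)
      rw [hL] at hstep
      rw [hstep]
      have hk : pvTakeCountLoop limit (ch :: r) (pvEncLen curC) 0 = 0 := by
        simp only [pvTakeCountLoop, ← pvUtf8Len_eq]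
        rw [if_pos hb]
      rw [hk]
      simp only [List.take_zero, List.drop_zero, List.append_nil]
      rw [pvPieces_cons, ← pvUtf8Len_eq]
      simp only [pvFlush, h, List.map_cons]
      cases first <;> simp
    · rw [if_neg hb]
      have hsum : pvEncLen curC + pvUtf8Len ch = pvEncLen (curC ++ [ch]) := by
        rw [pvEncLen_append_singleton]
      rw [hsum, ih (curC ++ [ch]) out first (by simp)]
      have hk : pvTakeCountLoop limit (ch :: r) (pvEncLen curC) 0
          = 1 + pvTakeCountLoop limit r (pvEncLen (curC ++ [ch])) 0 := by
        simp only [pvTakeCountLoop, ← pvUtf8Len_eq]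
        rw [if_neg hb, pvTakeCountLoop_shift, hsum]
      rw [hk]
      simp [List.take_succ_cons, List.drop_succ_cons, Nat.add_comm 1]

-- B's comprehension prefixes a space to every piece whose index is nonzero — so to every piece
-- when enumeration starts at 1
theorem pvEnumerate_map_space :
    ∀ (ps : List (List Char)) (s : Int), 1 ≤ s →
      (PySem.List.enumerate ps s).map
          (fun jp => if jp.1 == 0 then String.ofList jp.2 else String.ofList (' ' :: jp.2))
        = ps.map (fun p => String.ofList (' ' :: p)) := by
  intro ps
  induction ps with
  | nil => intro s _; simp [PySem.List.enumerate_nil]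
  | cons p ps ih =>
    intro s hs
    rw [PySem.List.enumerate_cons]
    simp only [List.map_cons]
    rw [ih (s + 1) (by omega)]
    have : (s == 0) = false := by simp; omega
    simp [this]

theorem pvEncLen_nonneg (cs : List Char) : 0 ≤ pvEncLen cs := by
  induction cs with
  | nil => simp [pvEncLen]
  | cons c cs ih =>
    have := pvUtf8LenB_pos c
    rw [← pvUtf8Len_eq] at this
    simp only [pvEncLen, List.map_cons, List.sum_cons]
    simp only [pvEncLen] at ih
    omega

-- ===== VERDICT (by name: the statement is the Claim_ definition above) =====
theorem fold_ical_line_py_spec : Claim_unchanged_fold_ical_line_py := by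
  intro line limit hdom
  unfold Spec_fold_ical_line_py
  intro hnd
  simp only [fold_ical_line_py, fold_ical_line_py_alt]
  have henc : pvEncLen line.toList = pvEncLenB line.toList := by
    simp [pvEncLen, pvEncLenB, pvUtf8Len_eq]
  rw [henc]
  by_cases hfit : pvEncLenB line.toList ≤ limit
  · rw [if_pos hfit, if_pos hfit]
  · rw [if_neg hfit, if_neg hfit]
    cases hl : line.toList with
    | nil =>
      show pvFinish (pvFoldLoop limit [] [] 0 [] true) = _
      simp [pvFoldLoop, pvFinish, pvFlush, pvPieces, PySem.List.enumerate_nil]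
    | cons c cs =>
      -- the first character fits: line ≠ "" so ¬D_ gives 1 ≤ limit, and c is one UTF-8 byte on Dom
      have hne : line ≠ "" := by
        intro h; rw [h] at hl; simp at hl
      have hlim : 1 ≤ limit := by
        by_contra h
        exact hnd ⟨hne, by omega⟩
      have hc1 : pvUtf8Len c = 1 := by
        have hmem : c ∈ line.toList := by rw [hl]; exact List.mem_cons_self
        have hdc : pvDomChar c = true := by
          have := hdom
          unfold Dom_fold_ical_line_py pvDomStr at this
          simp only [Bool.and_eq_true, List.all_eq_true] at this
          exact this.1 c hmem
        unfold pvDomChar at hdc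
        simp only [Bool.or_eq_true, Bool.and_eq_true, decide_eq_true_eq, beq_iff_eq] at hdc
        unfold pvUtf8Len
        rw [if_pos (by omega)]
      show pvFinish (pvFoldLoop limit (c :: cs) [] 0 [] true) = _
      simp only [pvFoldLoop]
      rw [if_neg (by omega)]
      have hstep := pvFoldLoop_chunks limit cs [c] [] true (by simp)
      have hL : pvEncLen [c] = pvUtf8Len c := by simp [pvEncLen]
      rw [hL] at hstep
      simp only [List.nil_append]
      rw [show (0 : Int) + pvUtf8Len c = pvUtf8Len c by omega, hstep, pvPieces_cons,
        ← pvUtf8Len_eq]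
      rw [PySem.List.enumerate_cons]
      simp only [List.map_cons]
      rw [pvEnumerate_map_space _ (0 + 1) (by omega)]
      simp

theorem pvPieces_nil (limit : Int) : pvPieces limit [] = [] := by
  unfold pvPieces; rfl

theorem fold_ical_line_py_changed : Claim_changed_fold_ical_line_py := by
  unfold Claim_changed_fold_ical_line_py
  refine ⟨by decide, by decide, by decide, ?_, by decide⟩
  show fold_ical_line_py_alt "ab" 0 = ["a", " b"]
  have hl : ("ab" : String).toList = ['a', 'b'] := rfl
  simp only [fold_ical_line_py_alt, hl]
  rw [if_neg (by decide)]
  rw [show ('a' :: ['b']) = ['a', 'b'] from rfl]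
  rw [pvPieces_cons]
  rw [show pvTakeCountLoop 0 ['b'] (pvUtf8LenB 'a') 0 = 0 from rfl]
  simp only [List.take_zero, List.drop_zero]
  rw [pvPieces_cons]
  rw [show pvTakeCountLoop 0 [] (pvUtf8LenB 'b') 0 = 0 from rfl]
  simp only [List.take_zero, List.drop_zero, pvPieces_nil]
  decide

theorem fold_ical_line_py_tight : Claim_exact_fold_ical_line_py := by
  intro line limit _ hd heq
  obtain ⟨hne, hlim⟩ := hd
  cases hl : line.toList with
  | nil =>
    exact hne (by rwa [String.toList_eq_nil_iff] at hl)
  | cons c cs =>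
    have hc := pvUtf8LenB_pos c
    have hcs := pvEncLen_nonneg cs
    have hfit : ¬ pvEncLen (c :: cs) ≤ limit := by
      simp only [pvEncLen, List.map_cons, List.sum_cons]
      rw [← pvUtf8Len_eq] at hc
      simp only [pvEncLen] at hcs
      omega
    have henc : pvEncLen (c :: cs) = pvEncLenB (c :: cs) := by
      simp [pvEncLen, pvEncLenB, pvUtf8Len_eq]
    have hb : (0 : Int) + pvUtf8Len c > limit := by
      rw [← pvUtf8Len_eq] at hc; omega
    -- A's first output chunk carries a space, B's does not; compare heads
    have hA : fold_ical_line_py line limit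
        = (String.ofList (' ' :: c :: cs.take (pvTakeCountLoop limit cs (pvUtf8LenB c) 0)))
          :: (pvPieces limit (cs.drop (pvTakeCountLoop limit cs (pvUtf8LenB c) 0))).map
               (fun p => String.ofList (' ' :: p)) := by
      simp only [fold_ical_line_py, hl]
      rw [if_neg hfit]
      show pvFinish (pvFoldLoop limit (c :: cs) [] 0 [] true) = _
      simp only [pvFoldLoop]
      rw [if_pos hb]
      have hstep := pvFoldLoop_chunks limit cs [c] (pvFlush [] [] (!true)) false (by simp)
      have hL : pvEncLen [c] = pvUtf8Len c := by simp [pvEncLen]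
      rw [hL] at hstep
      rw [hstep, ← pvUtf8Len_eq]
      simp [pvFlush]
    have hB : fold_ical_line_py_alt line limit
        = (String.ofList (c :: cs.take (pvTakeCountLoop limit cs (pvUtf8LenB c) 0)))
          :: (pvPieces limit (cs.drop (pvTakeCountLoop limit cs (pvUtf8LenB c) 0))).map
               (fun p => String.ofList (' ' :: p)) := by
      simp only [fold_ical_line_py_alt, hl]
      rw [if_neg (by rw [← henc]; exact hfit)]
      rw [pvPieces_cons, PySem.List.enumerate_cons]
      simp only [List.map_cons]
      rw [pvEnumerate_map_space _ (0 + 1) (by omega)]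
      simp
    rw [hA, hB] at heq
    have h1 : String.ofList (' ' :: c :: cs.take (pvTakeCountLoop limit cs (pvUtf8LenB c) 0))
        = String.ofList (c :: cs.take (pvTakeCountLoop limit cs (pvUtf8LenB c) 0)) :=
      (List.cons.injEq _ _ _ _ ▸ heq : _ ∧ _).1
    have h2 := congrArg String.toList h1
    simp only [String.toList_ofList] at h2
    have h3 := congrArg List.length h2
    simp at h3
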